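-- pv_equiv track=rewrite | github.com/pd-idubor/alx-interview | 0x0A-primegame/0-prime_game.py | game_win
-- ===== SOURCE A (Python) =====
-- def isPrime(n):
--     """Checks if a number is prime"""
--     if n == 1:
--         return False
--     if n == 2:
--         return True
--     d = n // 2 + 1
--     while d > 1:
--         if n % d == 0:
--             return False
--         d = d - 1
--     return True
--
-- def game_win(x, nums):
--     """Returns win of round"""
--     count = 0
--     try:
--         if x < 1 and len(nums) < 0:
--             return None
--         for i in range(x):
--             if isPrime(nums[i]):
--                 count += 1
--     except Exception:
--         return None
--     if count % 2 == 0 or x == 1: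
--         return "Ben"
--     return "Maria"
-- ===== SOURCE B (Python) =====
-- def _has_small_factor(m):
--     """True iff some d with 2 <= d and d*d <= m divides m."""
--     if m < 4:
--         return False
--     if m % 2 == 0:
--         return True
--     d = 3
--     while d * d <= m:
--         if m % d == 0:
--             return True
--         d += 2
--     return False
--
--
-- def game_win(x, nums):
--     """Returns win of round"""
--     if x > len(nums):
--         return None
--     count = sum(1 for m in nums[:max(x, 0)] if m != 1 and not _has_small_factor(m))
--     return "Ben" if count % 2 == 0 or x == 1 else "Maria"
-- ===== Notes on version B (the rewrite author's own statement) =====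
-- stated objective: faster
-- what changed: Replaces A's per-element countdown trial division from n//2 (O(n) per element) by a small-factor test bounded by sqrt(n) over odd candidates, and replaces the try/except indexing loop by an up-front length check plus a slice and a single generator sum.
import Mathlib
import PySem

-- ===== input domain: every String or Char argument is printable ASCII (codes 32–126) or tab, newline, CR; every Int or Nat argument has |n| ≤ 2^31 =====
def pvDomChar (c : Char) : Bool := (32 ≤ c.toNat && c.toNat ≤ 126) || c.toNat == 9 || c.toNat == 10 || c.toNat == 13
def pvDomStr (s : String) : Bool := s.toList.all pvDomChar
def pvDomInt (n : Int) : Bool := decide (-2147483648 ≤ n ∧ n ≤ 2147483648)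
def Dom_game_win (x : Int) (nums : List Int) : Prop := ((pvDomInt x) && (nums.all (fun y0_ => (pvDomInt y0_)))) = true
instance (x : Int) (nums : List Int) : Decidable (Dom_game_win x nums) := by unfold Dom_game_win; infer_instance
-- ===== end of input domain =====

-- B replaces A's countdown-from-n//2 trial division by a sqrt-bounded small-factor
-- test and the try/except indexing loop by a length check plus a slice (measured faster).

-- ===== PORT A =====
-- while d > 1: if n % d == 0: return False; d = d - 1
def isPrimeLoop (n : Int) (d : Int) : Bool :=
  if h : 1 < d then
    if PySem.Int.mod n d == 0 then false
    else isPrimeLoop n (d - 1)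
  else true
termination_by d.toNat
decreasing_by omega

def isPrime (n : Int) : Bool :=
  if n == 1 then false
  else if n == 2 then true
  else isPrimeLoop n (PySem.Int.floordiv n 2 + 1)

-- the guard 'x < 1 and len(nums) < 0' is never true; the IndexError caught by the
-- 'except' occurs exactly when x > len(nums) (every index of range(x) is nonnegative),
-- so the guard below makes the same computation total
def game_win (x : Int) (nums : List Int) : Option String :=
  if x > (nums.length : Int) then none
  else
    let count : Int := (PySem.List.pyRange 0 x 1).foldl
      (fun (c : Int) i => if isPrime (PySem.List.pyGetD nums i 0) then c + 1 else c) 0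
    if PySem.Int.mod count 2 == 0 || x == 1 then some "Ben" else some "Maria"

-- ===== PORT B =====
-- while d * d <= m: if m % d == 0: return True; d += 2
def hasFactorLoop (m : Int) (d : Int) : Bool :=
  if h : d * d ≤ m then
    if PySem.Int.mod m d == 0 then true
    else hasFactorLoop m (d + 2)
  else false
termination_by (m + 1 - d).toNat
decreasing_by
  have hdm : d ≤ m := by nlinarith
  omega

def hasSmallFactor (m : Int) : Bool :=
  if m < 4 then false
  else if PySem.Int.mod m 2 == 0 then true
  else hasFactorLoop m 3

-- the counting predicate of B's generator: m != 1 and not _has_small_factor(m)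
def bCounted (m : Int) : Bool := (!(m == 1)) && (!hasSmallFactor m)

def game_win_alt (x : Int) (nums : List Int) : Option String :=
  if x > (nums.length : Int) then none
  else
    let pre := PySem.List.slice nums none (some (max x 0))
    let count : Nat := (pre.filter bCounted).length
    if count % 2 == 0 || x == 1 then some "Ben" else some "Maria"

-- ===== PRECONDITION & SPEC =====
def Spec_game_win (x : Int) (nums : List Int) (out : Option String) : Prop := out = game_win_alt x nums
instance (x : Int) (nums : List Int) (out : Option String) : Decidable (Spec_game_win x nums out) := by unfold Spec_game_win; infer_instance

-- ===== CLAIM (what is proved, stated in full; the proofs are below) =====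
def Claim_equal_game_win : Prop := ∀ (x : Int) (nums : List Int), Dom_game_win x nums → Spec_game_win x nums (game_win x nums)

-- ===== LEMMAS AND PROOFS =====

lemma isPrimeLoop_done (n d : Int) (h : d ≤ 1) : isPrimeLoop n d = true := by
  unfold isPrimeLoop
  simp [show ¬ (1 < d) by omega]

lemma isPrimeLoop_false_iff (n d : Int) :
    isPrimeLoop n d = false ↔ ∃ e : Int, 2 ≤ e ∧ e ≤ d ∧ e ∣ n := by
  fun_induction isPrimeLoop n d with
  | case1 d h hm =>
      simp only [true_iff]
      exact ⟨d, by omega, le_refl _, (PySem.Int.mod_eq_zero_iff_dvd n d).1 (by simpa using hm)⟩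
  | case2 d h hm ih =>
      rw [ih]
      constructor
      · rintro ⟨e, he2, hed, hdvd⟩; exact ⟨e, he2, by omega, hdvd⟩
      · rintro ⟨e, he2, hed, hdvd⟩
        refine ⟨e, he2, ?_, hdvd⟩
        rcases eq_or_lt_of_le hed with rfl | hlt
        · exact absurd ((PySem.Int.mod_eq_zero_iff_dvd n e).2 hdvd) (by simpa using hm)
        · omega
  | case3 d h =>
      simp only [Bool.true_eq_false, false_iff]
      rintro ⟨e, he2, hed, _⟩; omega

lemma hasFactorLoop_true_iff (m d : Int) (hd : 1 ≤ d) (hodd : Odd d) :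
    hasFactorLoop m d = true ↔ ∃ e : Int, Odd e ∧ d ≤ e ∧ e * e ≤ m ∧ e ∣ m := by
  revert hd hodd
  fun_induction hasFactorLoop m d with
  | case1 d h hm =>
      intro hd hodd
      simp only [true_iff]
      exact ⟨d, hodd, le_refl _, h, (PySem.Int.mod_eq_zero_iff_dvd m d).1 (by simpa using hm)⟩
  | case2 d h hm ih =>
      intro hd hodd
      rw [ih (by omega) (by rcases hodd with ⟨k, hk⟩; exact ⟨k + 1, by omega⟩)]
      constructor
      · rintro ⟨e, heo, hde, hee, hdvd⟩; exact ⟨e, heo, by omega, hee, hdvd⟩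
      · rintro ⟨e, heo, hde, hee, hdvd⟩
        refine ⟨e, heo, ?_, hee, hdvd⟩
        rcases eq_or_lt_of_le hde with rfl | hlt
        · exact absurd ((PySem.Int.mod_eq_zero_iff_dvd m d).2 hdvd) (by simpa using hm)
        · rcases hodd with ⟨a, ha⟩; rcases heo with ⟨b, hb⟩; omega
  | case3 d h =>
      intro hd hodd
      simp only [Bool.false_eq_true, false_iff]
      rintro ⟨e, heo, hde, hee, _⟩
      have : d * d ≤ e * e := by nlinarith
      omega

-- for odd m ≥ 3: a divisor in [2, m//2+1] exists iff an odd divisor e with e*e ≤ m exists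
lemma composite_bridge (m : Int) (hm : 3 ≤ m) (hmo : Odd m) :
    (∃ e : Int, 2 ≤ e ∧ e ≤ PySem.Int.floordiv m 2 + 1 ∧ e ∣ m) ↔
    (∃ e : Int, Odd e ∧ 3 ≤ e ∧ e * e ≤ m ∧ e ∣ m) := by
  constructor
  · rintro ⟨e, he2, heb, hdvd⟩
    have hfd : PySem.Int.floordiv m 2 + 1 < m := by
      have := (PySem.Int.floordiv_lt_iff_lt_mul (a := m) (b := 2) (q := m - 1) (by norm_num)).2 (by omega)
      omega
    have hem : e < m := by omega
    set N := m.toNat with hN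
    have hmN : (N : Int) = m := Int.toNat_of_nonneg (by omega)
    have heN : (e.toNat : Int) = e := Int.toNat_of_nonneg (by omega)
    have hdvdN : e.toNat ∣ N := by
      rwa [← Int.natCast_dvd_natCast, hmN, heN]
    have hnotp : ¬ Nat.Prime N := by
      intro hp
      exact (Nat.prime_def_lt'.1 hp).2 e.toNat (by omega) (by omega) hdvdN
    have hp := Nat.minFac_prime (n := N) (by omega)
    have hpd : N.minFac ∣ N := Nat.minFac_dvd N
    have hpsq : N.minFac ^ 2 ≤ N := Nat.minFac_sq_le_self (by omega) hnotp
    have hNodd : Odd N := by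
      rwa [← Int.odd_coe_nat, hmN]
    have hp2 : N.minFac ≠ 2 := by
      intro h2
      have : (2 : ℕ) ∣ N := h2 ▸ hpd
      rcases hNodd with ⟨k, hk⟩; omega
    have hpodd : Odd N.minFac := hp.odd_of_ne_two hp2
    refine ⟨(N.minFac : Int), (Int.odd_coe_nat _).2 hpodd, ?_, ?_, ?_⟩
    · have := hp.two_le
      rcases hpodd with ⟨k, hk⟩
      omega
    · have : (N.minFac * N.minFac : ℕ) ≤ N := by nlinarith [hpsq]
      calc (N.minFac : Int) * N.minFac = ((N.minFac * N.minFac : ℕ) : Int) := by push_cast; ring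
        _ ≤ (N : Int) := by exact_mod_cast this
        _ = m := hmN
    · rw [← hmN]; exact_mod_cast hpd
  · rintro ⟨e, heo, he3, hee, hdvd⟩
    refine ⟨e, by omega, ?_, hdvd⟩
    have : e ≤ PySem.Int.floordiv m 2 :=
      (PySem.Int.le_floordiv_iff_mul_le (by norm_num)).2 (by nlinarith)
    omega

lemma counted_eq (m : Int) : isPrime m = bCounted m := by
  by_cases h1 : m = 1
  · subst h1; decide
  by_cases h2 : m = 2
  · subst h2; decide
  by_cases h3 : m = 3
  · subst h3
    have hloop : isPrimeLoop 3 2 = true := by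
      rcases Bool.eq_false_or_eq_true (isPrimeLoop 3 2) with ht | hf
      · exact ht
      · exfalso
        rcases (isPrimeLoop_false_iff 3 2).1 hf with ⟨e, he2, hed, hdvd⟩
        have he : e = 2 := by omega
        subst he
        rcases hdvd with ⟨k, hk⟩
        omega
    have hA3 : isPrime 3 = true := by
      unfold isPrime
      rw [if_neg (by decide), if_neg (by decide),
          show PySem.Int.floordiv 3 2 + 1 = 2 from by decide, hloop]
    rw [hA3]; decide
  by_cases h0 : m < 4
  · -- m ≤ 0: A's loop starts at m//2 + 1 ≤ 1 and is skipped; B's small-factor test is false below 4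
    have h0' : m < 2 := by omega
    have hb : bCounted m = true := by
      simp [bCounted, hasSmallFactor, h1, h0]
    rw [hb]
    unfold isPrime
    rw [if_neg (by simpa using h1), if_neg (by simpa using h2)]
    apply isPrimeLoop_done
    have : PySem.Int.floordiv m 2 < 1 :=
      (PySem.Int.floordiv_lt_iff_lt_mul (by norm_num)).2 (by omega)
    omega
  · -- m ≥ 4
    have hm4 : 4 ≤ m := by omega
    have hA : isPrime m = isPrimeLoop m (PySem.Int.floordiv m 2 + 1) := by
      unfold isPrime
      rw [if_neg (by simpa using h1), if_neg (by simpa using h2)]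
    have hB : bCounted m = !hasSmallFactor m := by
      simp [bCounted, h1]
    rw [hA, hB]
    unfold hasSmallFactor
    rw [if_neg (by omega)]
    by_cases heven : (2 : Int) ∣ m
    · rw [if_pos (by simpa using (PySem.Int.mod_eq_zero_iff_dvd m 2).2 heven)]
      have hfd : 1 ≤ PySem.Int.floordiv m 2 :=
        (PySem.Int.le_floordiv_iff_mul_le (by norm_num)).2 (by omega)
      have : isPrimeLoop m (PySem.Int.floordiv m 2 + 1) = false :=
        (isPrimeLoop_false_iff m _).2 ⟨2, le_refl _, by omega, heven⟩
      rw [this]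
      decide
    · rw [if_neg (by simpa using fun h => heven ((PySem.Int.mod_eq_zero_iff_dvd m 2).1 h))]
      have hmo : Odd m := by
        rcases Int.even_or_odd m with h | h
        · exact absurd (by rcases h with ⟨k, hk⟩; exact ⟨k, by omega⟩) heven
        · exact h
      have hkey : isPrimeLoop m (PySem.Int.floordiv m 2 + 1) = false ↔ hasFactorLoop m 3 = true := by
        rw [isPrimeLoop_false_iff, hasFactorLoop_true_iff m 3 (by norm_num) ⟨1, by norm_num⟩]
        exact composite_bridge m (by omega) hmo
      cases hA' : isPrimeLoop m (PySem.Int.floordiv m 2 + 1) <;>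
        cases hB' : hasFactorLoop m 3 <;> simp_all

lemma count_eq (x : Int) (nums : List Int) (hx : 0 < x) (hlen : x ≤ (nums.length : Int)) :
    (PySem.List.pyRange 0 x 1).foldl
      (fun (c : Int) i => if isPrime (PySem.List.pyGetD nums i 0) then c + 1 else c) 0
    = (List.countP bCounted (nums.take x.toNat) : Int) := by
  have hstep : (PySem.List.pyRange 0 x 1).foldl
      (fun (c : Int) i => if isPrime (PySem.List.pyGetD nums i 0) then c + 1 else c) 0
      = (PySem.List.pyRange 0 x 1).foldl
      (fun (c : Int) i => if bCounted (PySem.List.pyGetD (nums.take x.toNat) i 0) then c + 1 else c) 0 := by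
    apply PySem.List.foldl_congr_mem
    intro acc i hi
    have hi' := (PySem.List.mem_pyRange_one).1 hi
    have hget : PySem.List.pyGetD nums i 0 = PySem.List.pyGetD (nums.take x.toNat) i 0 := by
      rw [PySem.List.pyGetD_eq_getElem nums 0 (by omega) (by omega),
          PySem.List.pyGetD_eq_getElem (nums.take x.toNat) 0 (by omega)
            (by simp [List.length_take]; omega)]
      simp [List.getElem_take]
    rw [hget, counted_eq]
  rw [hstep]
  set t := nums.take x.toNat with ht
  have hlen' : ((t.length : Int)) = x := by
    simp [ht, List.length_take]; omega
  have hfold := PySem.List.foldl_pyRange_zero_pyGetD' t 0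
      (fun (c : Int) a => if bCounted a then c + 1 else c) 0
  rw [hlen'] at hfold
  rw [hfold, PySem.List.foldl_count_if]
  simp

-- ===== VERDICT (by name: the statement is the Claim_ definition above) =====
theorem game_win_spec : Claim_equal_game_win := by
  intro x nums _
  unfold Spec_game_win game_win game_win_alt
  by_cases hgt : x > (nums.length : Int)
  · rw [if_pos hgt, if_pos hgt]
  · rw [if_neg hgt, if_neg hgt]
    by_cases hx : 0 < x
    · simp only [show max x 0 = x from by omega]
      rw [PySem.List.slice_to nums (by omega)]
      rw [count_eq x nums hx (by omega), ← List.countP_eq_length_filter]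
      have hmcast : PySem.Int.mod ((List.countP bCounted (nums.take x.toNat) : Nat) : Int) 2
          = (((List.countP bCounted (nums.take x.toNat)) % 2 : ℕ) : Int) := by
        exact_mod_cast PySem.Int.mod_natCast (List.countP bCounted (nums.take x.toNat)) 2
      rw [hmcast]
      by_cases hp : (List.countP bCounted (nums.take x.toNat)) % 2 = 0
      · simp [hp]
      · have hnd : ¬ (2 : Int) ∣ ((List.countP bCounted (nums.take x.toNat) : Nat) : Int) := by
          omega
        simp [hp, hnd]
    · simp only [show max x 0 = (0 : Int) from by omega]
      rw [PySem.List.slice_to nums (by omega), PySem.List.pyRange_one_eq_nil (by omega : x ≤ 0)]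
      simp
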